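-- pv_equiv track=rewrite | github.com/sharma-anubhav/CrackingTheCodingInterview-DSA | ch50(Monotonic)/50.5(Revcipie).py | next_greater_or_equal_element
-- ===== SOURCE A (Python) =====
-- def next_greater_or_equal_element(arr):
--   n = len(arr)
--   nge = [-1] * n
--   stack = []
--
--   for i in range(n - 1, -1, -1):
--     while stack and arr[stack[-1]] < arr[i]:
--       stack.pop()
--     if stack:
--       nge[i] = stack[-1]
--     stack.append(i)
--   return nge
-- ===== SOURCE B (Python) =====
-- def next_greater_or_equal_element(arr):
--   n = len(arr)
--   nge = [-1] * n
--   for i in range(n):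
--     for j in range(i + 1, n):
--       if arr[j] >= arr[i]:
--         nge[i] = j
--         break
--   return nge
-- ===== Notes on version B (the rewrite author's own statement) =====
-- stated objective: simpler
-- what changed: Replaces the right-to-left monotonic-stack pass with a direct brute-force forward scan: for each index, scan rightwards for the first element >= it.
import Mathlib
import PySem

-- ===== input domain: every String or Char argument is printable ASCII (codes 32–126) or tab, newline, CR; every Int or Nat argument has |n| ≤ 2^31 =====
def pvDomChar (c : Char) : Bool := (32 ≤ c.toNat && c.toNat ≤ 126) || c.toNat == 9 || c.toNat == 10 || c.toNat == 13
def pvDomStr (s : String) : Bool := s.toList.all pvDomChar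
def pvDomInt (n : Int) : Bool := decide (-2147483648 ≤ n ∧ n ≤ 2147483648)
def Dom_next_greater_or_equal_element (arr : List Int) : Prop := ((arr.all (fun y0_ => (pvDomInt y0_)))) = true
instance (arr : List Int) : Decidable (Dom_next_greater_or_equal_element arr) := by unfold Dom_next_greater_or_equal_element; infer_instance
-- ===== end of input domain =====

-- B replaces A's right-to-left monotonic-stack pass with a brute-force forward scan
-- (for each index, the first j to the right with arr[j] >= arr[i]); objective: simpler.

-- ===== PORT A =====
-- the `while stack and arr[stack[-1]] < arr[i]: stack.pop()` loop; stack top = list head;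
-- all indices on the stack are in range, so `arr.getD j 0` is exact for Python's `arr[j]`
def popWhileA (arr : List Int) (x : Int) : List Nat → List Nat
  | [] => []
  | j :: s => if arr.getD j 0 < x then popWhileA arr x s else j :: s

-- one iteration of A's `for i in range(n-1,-1,-1)` loop body, state = (nge, stack)
def stepA (arr : List Int) (i : Nat) (st : List Int × List Nat) : List Int × List Nat :=
  let stack := popWhileA arr (arr.getD i 0) st.2
  let nge := match stack with
    | [] => st.1
    | j :: _ => st.1.set i (Int.ofNat j)   -- `nge[i] = stack[-1]`; i < n so List.set is exact
  (nge, i :: stack)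

-- `for i in range(n-1,-1,-1)` iterates i = n-1 down to 0: a foldr over List.range n
def next_greater_or_equal_element (arr : List Int) : List Int :=
  ((List.range arr.length).foldr (stepA arr) (List.replicate arr.length (-1), [])).1

-- ===== PORT B =====
-- B's inner loop `for j in range(i+1, n): if arr[j] >= arr[i]: ...break` with `-1` default
def scanB (arr : List Int) (x : Int) (j : Nat) : Int :=
  if _h : j < arr.length then
    if x ≤ arr.getD j 0 then Int.ofNat j else scanB arr x (j + 1)
  else -1
termination_by arr.length - j

def next_greater_or_equal_element_alt (arr : List Int) : List Int :=
  (List.range arr.length).map (fun i => scanB arr (arr.getD i 0) (i + 1))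

-- ===== PRECONDITION & SPEC =====
def Spec_next_greater_or_equal_element (arr : List Int) (out : List Int) : Prop := out = next_greater_or_equal_element_alt arr
instance (arr : List Int) (out : List Int) : Decidable (Spec_next_greater_or_equal_element arr out) := by unfold Spec_next_greater_or_equal_element; infer_instance

-- ===== CLAIM (what is proved, stated in full; the proofs are below) =====
def Claim_equal_next_greater_or_equal_element : Prop := ∀ (arr : List Int), Dom_next_greater_or_equal_element arr → Spec_next_greater_or_equal_element arr (next_greater_or_equal_element arr)

-- ===== LEMMAS AND PROOFS =====

-- `goodB arr i j`: arr[j] is ≥ every arr[k] for i ≤ k < j (j survives on the stack at time i)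
def goodB (arr : List Int) (i j : Nat) : Bool :=
  (List.range' i (j - i)).all (fun k => decide (arr.getD k 0 ≤ arr.getD j 0))

-- the stack contents after A has processed indices n-1 … i
def stk (arr : List Int) (i : Nat) : List Nat :=
  (List.range' i (arr.length - i)).filter (goodB arr i)

-- the nge array after A has processed indices n-1 … i
def ngeAt (arr : List Int) (i : Nat) : List Int :=
  (List.range arr.length).map (fun p => if p < i then (-1 : Int) else scanB arr (arr.getD p 0) (p + 1))

def hd2i (o : Option Nat) : Int := o.elim (-1) Int.ofNat

theorem popWhileA_eq_dropWhile (arr : List Int) (x : Int) (s : List Nat) :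
    popWhileA arr x s = s.dropWhile (fun j => decide (arr.getD j 0 < x)) := by
  induction s with
  | nil => rfl
  | cons j t ih =>
    rw [popWhileA, List.dropWhile_cons]
    by_cases h : arr.getD j 0 < x
    · rw [if_pos h, if_pos (by simpa using h), ih]
    · rw [if_neg h, if_neg (by simpa using h)]

theorem mem_stk (arr : List Int) (i j : Nat) (h : j ∈ stk arr i) :
    i ≤ j ∧ j < arr.length ∧ goodB arr i j = true := by
  unfold stk at h
  rcases List.mem_filter.1 h with ⟨hm, hg⟩
  rcases List.mem_range'.1 hm with ⟨k, hk, rfl⟩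
  exact ⟨by omega, by omega, hg⟩

theorem good_le (arr : List Int) (i j k : Nat) (hg : goodB arr i j = true)
    (h1 : i ≤ k) (h2 : k < j) : arr.getD k 0 ≤ arr.getD j 0 := by
  unfold goodB at hg
  have := List.all_eq_true.1 hg k (by
    refine List.mem_range'.2 ⟨k - i, by omega, by omega⟩)
  exact of_decide_eq_true this

theorem stk_mono (arr : List Int) (i : Nat) :
    (stk arr i).Pairwise (fun j1 j2 => arr.getD j1 0 ≤ arr.getD j2 0) := by
  have hlt : (stk arr i).Pairwise (· < ·) :=
    (List.pairwise_lt_range' 1).filter _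
  refine hlt.imp_of_mem ?_
  intro j1 j2 h1 h2 hlt12
  rcases mem_stk arr i j1 h1 with ⟨hi1, _, _⟩
  rcases mem_stk arr i j2 h2 with ⟨_, _, hg2⟩
  exact good_le arr i j2 j1 hg2 hi1 hlt12

theorem dropWhile_eq_filter_of_mono (arr : List Int) (x : Int) (l : List Nat)
    (h : l.Pairwise (fun j1 j2 => arr.getD j1 0 ≤ arr.getD j2 0)) :
    l.dropWhile (fun j => decide (arr.getD j 0 < x)) =
      l.filter (fun j => decide (x ≤ arr.getD j 0)) := by
  induction l with
  | nil => rfl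
  | cons j t ih =>
    rcases List.pairwise_cons.1 h with ⟨hj, ht⟩
    by_cases hx : arr.getD j 0 < x
    · rw [List.dropWhile_cons, if_pos (by simpa using hx), List.filter_cons,
        if_neg (by simpa using not_le.2 hx)]
      exact ih ht
    · have hxj : x ≤ arr.getD j 0 := not_lt.1 hx
      rw [List.dropWhile_cons, if_neg (by simpa using hx), List.filter_cons,
        if_pos (by simpa using hxj),
        List.filter_eq_self.2 (fun b hb => decide_eq_true (le_trans hxj (hj b hb)))]

theorem goodB_split (arr : List Int) (i j : Nat) (hij : i < j) :
    goodB arr i j = (decide (arr.getD i 0 ≤ arr.getD j 0) && goodB arr (i + 1) j) := by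
  unfold goodB
  have h : j - i = (j - (i + 1)) + 1 := by omega
  rw [h, List.range'_succ, List.all_cons]

theorem stk_succ (arr : List Int) (i : Nat) (h : i < arr.length) :
    stk arr i = i :: (stk arr (i + 1)).filter (fun j => decide (arr.getD i 0 ≤ arr.getD j 0)) := by
  unfold stk
  have hn : arr.length - i = (arr.length - (i + 1)) + 1 := by omega
  rw [hn, List.range'_succ, List.filter_cons]
  have hgi : goodB arr i i = true := by
    unfold goodB; simp
  rw [hgi, if_pos rfl, List.filter_filter]
  congr 1
  refine List.filter_congr ?_
  intro j hj
  rcases List.mem_range'.1 hj with ⟨k, hk, rfl⟩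
  rw [goodB_split arr i _ (by omega)]

theorem head_filter_skip (arr : List Int) (x : Int) (i : Nat) :
    ∀ (m j : Nat), i + 1 ≤ j → (∀ k, i + 1 ≤ k → k < j → arr.getD k 0 < x) →
    (((List.range' j m).filter (goodB arr (i + 1))).filter
        (fun t => decide (x ≤ arr.getD t 0))).head? =
      ((List.range' j m).filter (fun t => decide (x ≤ arr.getD t 0))).head? := by
  intro m
  induction m with
  | zero => intro j _ _; rfl
  | succ m ih =>
    intro j hij hk
    rw [List.range'_succ, List.filter_filter]
    by_cases hx : x ≤ arr.getD j 0
    · have hg : goodB arr (i + 1) j = true := by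
        unfold goodB
        refine List.all_eq_true.2 ?_
        intro k hkm
        rcases List.mem_range'.1 hkm with ⟨t, ht, rfl⟩
        exact decide_eq_true (le_of_lt (lt_of_lt_of_le (hk _ (by omega) (by omega)) hx))
      rw [List.filter_cons, List.filter_cons,
        if_pos (by simp only [decide_eq_true hx, hg, Bool.and_self]),
        if_pos (by simpa using hx)]
      rfl
    · have hk' : ∀ k, i + 1 ≤ k → k < j + 1 → arr.getD k 0 < x := by
        intro k h1 h2
        by_cases hkj : k = j
        · subst hkj; exact not_le.1 hx
        · exact hk k h1 (by omega)
      rw [List.filter_cons, List.filter_cons,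
        if_neg (by rw [decide_eq_false hx, Bool.false_and]; exact Bool.false_ne_true),
        if_neg (by simpa using hx), ← List.filter_filter]
      exact ih (j + 1) (by omega) hk'

theorem scanB_eq_head (arr : List Int) (x : Int) :
    ∀ (m j : Nat), m = arr.length - j →
    hd2i (((List.range' j m).filter (fun t => decide (x ≤ arr.getD t 0))).head?) = scanB arr x j := by
  intro m
  induction m with
  | zero =>
    intro j hm
    rw [scanB]
    simp only [List.range'_zero, List.filter_nil]
    rw [dif_neg (by omega)]
    rfl
  | succ m ih =>
    intro j hm
    have hj : j < arr.length := by omega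
    rw [List.range'_succ, scanB, dif_pos hj]
    by_cases hx : x ≤ arr.getD j 0
    · rw [List.filter_cons, if_pos (by simpa using hx), if_pos hx]
      rfl
    · rw [List.filter_cons, if_neg (by simpa using hx), if_neg hx]
      exact ih (j + 1) (by omega)

theorem ngeAt_top (arr : List Int) :
    ngeAt arr arr.length = List.replicate arr.length (-1) := by
  unfold ngeAt
  rw [List.map_congr_left (g := fun _ => (-1 : Int)) ?_, List.map_const', List.length_range]
  intro p hp
  rw [if_pos (List.mem_range.1 hp)]

theorem stk_top (arr : List Int) : stk arr arr.length = [] := by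
  unfold stk
  simp

theorem ngeAt_none (arr : List Int) (i : Nat)
    (hs : scanB arr (arr.getD i 0) (i + 1) = -1) :
    ngeAt arr i = ngeAt arr (i + 1) := by
  unfold ngeAt
  refine List.map_congr_left ?_
  intro p _
  by_cases hpi : p = i
  · subst hpi
    rw [if_neg (by omega : ¬ p < p), if_pos (by omega : p < p + 1)]
    exact hs
  · by_cases hp : p < i
    · rw [if_pos hp, if_pos (by omega)]
    · rw [if_neg hp, if_neg (by omega)]

theorem ngeAt_set (arr : List Int) (i : Nat) (v : Int) (_hi : i < arr.length)
    (hv : scanB arr (arr.getD i 0) (i + 1) = v) :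
    (ngeAt arr (i + 1)).set i v = ngeAt arr i := by
  refine List.ext_getElem ?_ ?_
  · simp [ngeAt]
  · intro p h1 h2
    have hp : p < arr.length := by simpa [ngeAt] using h2
    rw [List.getElem_set]
    by_cases hpi : i = p
    · subst hpi
      rw [if_pos rfl]
      simp only [ngeAt, List.getElem_map, List.getElem_range]
      rw [if_neg (by omega : ¬ i < i)]
      exact hv.symm
    · rw [if_neg hpi]
      simp only [ngeAt, List.getElem_map, List.getElem_range]
      by_cases hlt : p < i
      · rw [if_pos hlt, if_pos (by omega)]
      · rw [if_neg hlt, if_neg (by omega)]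

theorem invMain (arr : List Int) :
    ∀ (m i : Nat), i + m = arr.length →
    (List.range' i m).foldr (stepA arr) (List.replicate arr.length (-1), []) =
      (ngeAt arr i, stk arr i) := by
  intro m
  induction m with
  | zero =>
    intro i hi
    have : i = arr.length := by omega
    subst this
    simp [ngeAt_top, stk_top]
  | succ m ih =>
    intro i hi
    have hin : i < arr.length := by omega
    rw [List.range'_succ, List.foldr_cons, ih (i + 1) (by omega)]
    have hpop : popWhileA arr (arr.getD i 0) (stk arr (i + 1)) =
        (stk arr (i + 1)).filter (fun j => decide (arr.getD i 0 ≤ arr.getD j 0)) := by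
      rw [popWhileA_eq_dropWhile,
        dropWhile_eq_filter_of_mono arr _ _ (stk_mono arr (i + 1))]
    have hhead : hd2i (((stk arr (i + 1)).filter
        (fun j => decide (arr.getD i 0 ≤ arr.getD j 0))).head?) =
        scanB arr (arr.getD i 0) (i + 1) := by
      unfold stk
      rw [head_filter_skip arr _ i _ (i + 1) (le_refl _) (by intro k h1 h2; omega)]
      exact scanB_eq_head arr _ _ (i + 1) rfl
    unfold stepA
    simp only [hpop]
    rw [← stk_succ arr i hin]
    congr 1
    rcases hcase : (stk arr (i + 1)).filter
        (fun j => decide (arr.getD i 0 ≤ arr.getD j 0)) with _ | ⟨j, t⟩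
    · rw [hcase] at hhead
      simp only [List.head?_nil, hd2i, Option.elim] at hhead
      exact (ngeAt_none arr i hhead.symm).symm
    · rw [hcase] at hhead
      simp only [List.head?_cons, hd2i, Option.elim] at hhead
      exact ngeAt_set arr i (Int.ofNat j) hin hhead.symm

-- ===== VERDICT (by name: the statement is the Claim_ definition above) =====
theorem next_greater_or_equal_element_spec : Claim_equal_next_greater_or_equal_element := by
  intro arr _
  unfold Spec_next_greater_or_equal_element next_greater_or_equal_element
  rw [List.range_eq_range', invMain arr arr.length 0 (by omega)]
  unfold ngeAt next_greater_or_equal_element_alt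
  exact List.map_congr_left (fun p _ => by simp)
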